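-- pv_equiv track=rewrite | github.com/olgaObnosova/EGE | №23/20198-kege.py | f
-- ===== SOURCE A (Python) =====
-- def f(st, end, s):
--     if 'AAA' in s or st >37:
--         return 0
--     elif st==end and 'AAA' not in s:
--         return 1
--     return f(st-1, end, s + 'A')+\
--         f(st+5, end, s + 'B') + \
--         f(st *2, end, s + 'C')
-- ===== SOURCE B (Python) =====
-- def f(st, end, s):
--     # Bounded-state value iteration instead of exponential tree recursion.
--     if 'AAA' in s or st > 37:
--         return 0
--     if st == end:
--         return 1
--     tr = 0                      # number of trailing 'A's of s (<= 2, since 'AAA' not in s)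
--     for ch in reversed(s):
--         if ch != 'A':
--             break
--         tr += 1
--     if st < 0:
--         return 0                # the original recursion never returns from these states
--     # states (i, t): position i in 0..37, t = current run of trailing 'A' moves (0..2);
--     # 40 rounds of the Bellman update count all complete paths (their depth is <= 37)
--     v = [[0] * 3 for _ in range(38)]
--     for _ in range(40):
--         def get(j, u):
--             if j > 37:
--                 return 0
--             if j == end:
--                 return 1
--             if 0 <= j:
--                 return v[j][u]
--             return 0
--         v = [[(get(i - 1, t + 1) if t < 2 else 0) + get(i + 5, 0) + get(2 * i, 0)
--               for t in range(3)] for i in range(38)]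
--     return v[st][tr]
-- ===== Notes on version B (the rewrite author's own statement) =====
-- stated objective: alternative
-- what changed: A counts accepting paths by recursing over (st, s) and enumerating the whole call tree; B instead runs 40 rounds of a Bellman value-iteration update over the bounded state table (position 0..37 x trailing-'A' run 0..2) and reads the answer off the table; Pre_f excludes only inputs on which A recurses forever (RecursionError).
import Mathlib
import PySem

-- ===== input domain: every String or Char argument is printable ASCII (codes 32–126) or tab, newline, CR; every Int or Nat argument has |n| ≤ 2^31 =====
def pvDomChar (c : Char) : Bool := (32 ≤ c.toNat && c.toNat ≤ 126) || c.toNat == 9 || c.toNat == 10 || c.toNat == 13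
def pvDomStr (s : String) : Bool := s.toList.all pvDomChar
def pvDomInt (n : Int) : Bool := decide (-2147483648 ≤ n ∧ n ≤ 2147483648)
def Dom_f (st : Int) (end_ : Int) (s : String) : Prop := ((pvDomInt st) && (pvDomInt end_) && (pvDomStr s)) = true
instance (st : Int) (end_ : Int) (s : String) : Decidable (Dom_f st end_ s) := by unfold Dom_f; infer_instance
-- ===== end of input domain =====

-- B replaces A's tree recursion over (st, s) by a 40-round value iteration over the finite
-- state table (position 0..37 × trailing-'A' run 0..2): an alternative algorithm, same result.


-- number of leading 'A's of a list (applied to the REVERSED string: the trailing-'A' run)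
def trailA (r : List Char) : Nat := (r.takeWhile (fun c => c == 'A')).length

-- ===== PORT A =====
-- Python A recurses without any bound and does not terminate on every input; the port uses
-- fuel 41, which exceeds the recursion depth (≤ 37) on every input admitted by Pre_f below,
-- so on Pre_f the port computes exactly what the Python computes.
def fAList : Nat → Int → Int → List Char → Int
  | 0, _, _, _ => 0
  | Nat.succ n, st, end_, s =>
    if PySem.Chars.isIn ['A', 'A', 'A'] s || decide (st > 37) then 0
    else if st = end_ then 1   -- Python's "'AAA' not in s" here is already known true
    else fAList n (st - 1) end_ (s ++ ['A']) + fAList n (st + 5) end_ (s ++ ['B'])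
         + fAList n (st * 2) end_ (s ++ ['C'])

def f (st : Int) (end_ : Int) (s : String) : Int := fAList 41 st end_ s.toList

-- ===== PORT B =====
-- v[j][u] (the index is always in range where Source B reads it)
def bIdx (v : List (List Int)) (j : Int) (u : Int) : Int :=
  (PySem.List.pyGet? ((PySem.List.pyGet? v j).getD []) u).getD 0

-- the closure 'get' of Source B
def bGet (end_ : Int) (v : List (List Int)) (j : Int) (u : Int) : Int :=
  if j > 37 then 0
  else if j = end_ then 1
  else if 0 ≤ j then bIdx v j u
  else 0

-- one round of the Bellman update (the list comprehension of Source B)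
def bStep (end_ : Int) (v : List (List Int)) : List (List Int) :=
  (PySem.List.pyRange 0 38 1).map (fun i =>
    (PySem.List.pyRange 0 3 1).map (fun t =>
      (if t < 2 then bGet end_ v (i - 1) (t + 1) else 0)
      + bGet end_ v (i + 5) 0 + bGet end_ v (2 * i) 0))

def f_alt (st : Int) (end_ : Int) (s : String) : Int :=
  if PySem.Str.isIn "AAA" s || decide (st > 37) then 0
  else if st = end_ then 1
  else
    let tr : Int := trailA s.toList.reverse   -- the reversed-scan counting loop of Source B
    if st < 0 then 0
    else
      let v0 : List (List Int) := (PySem.List.pyRange 0 38 1).map (fun _ => [0, 0, 0])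
      let v := (PySem.List.pyRange 0 40 1).foldl (fun v _ => bStep end_ v) v0
      bIdx v st tr

-- ===== PRECONDITION & SPEC =====
-- the states (position i, trailing-'A' run t) from which A's recursion tree is finite
-- (with i in 1..37 and i ≠ end_); derived from the well-founded part of the step graph
def okState (end_ i t : Int) : Prop :=
  1 ≤ i ∧ i ≤ 37 ∧ 0 ≤ t ∧ t ≤ 2 ∧ i ≠ end_ ∧
  (5 ≤ i ∨
   (i = 4 ∧ (1 ≤ t ∨ end_ = 2 ∨ end_ = 3)) ∨
   (i = 3 ∧ (t = 2 ∨ end_ = 2 ∨ (t = 1 ∧ end_ = 4))) ∨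
   (i = 2 ∧ t = 2 ∧ (end_ = 3 ∨ end_ = 4)) ∨
   (i = 1 ∧ t = 2 ∧ end_ = 2))

-- Pre_f admits exactly the inputs on which Python A returns a value: everywhere outside it
-- (st ≤ 0 with st ≠ end_, or a low start state whose call graph reaches a cycle or the
-- st = 0 self-loop not cut by end_) A's recursion is infinite and raises RecursionError.
def Pre_f (st : Int) (end_ : Int) (s : String) : Prop :=
  PySem.Str.isIn "AAA" s = true ∨ st > 37 ∨ st = end_ ∨
  okState end_ st (trailA s.toList.reverse : Int)
instance (st : Int) (end_ : Int) (s : String) : Decidable (Pre_f st end_ s) := by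
  unfold Pre_f okState; infer_instance

def pvWitness_f : Int × Int × String := (5, 100, "")

def Spec_f (st : Int) (end_ : Int) (s : String) (out : Int) : Prop := out = f_alt st end_ s
instance (st : Int) (end_ : Int) (s : String) (out : Int) : Decidable (Spec_f st end_ s out) := by
  unfold Spec_f; infer_instance

-- ===== CLAIM (what is proved, stated in full; the proofs are below) =====
def Claim_equal_f : Prop := ∀ (st : Int) (end_ : Int) (s : String),
  Dom_f st end_ s → Pre_f st end_ s → Spec_f st end_ s (f st end_ s)

-- ===== LEMMAS AND PROOFS =====

-- s-free version of A's recursion: the string only matters through the trailing-'A' run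
def FA : Nat → Int → Int → Nat → Int
  | 0, _, _, _ => 0
  | Nat.succ n, st, end_, t =>
    if st > 37 then 0
    else if st = end_ then 1
    else (if t < 2 then FA n (st - 1) end_ (t + 1) else 0)
         + FA n (st + 5) end_ 0 + FA n (st * 2) end_ 0

theorem FA_succ (n : Nat) (st end_ : Int) (t : Nat) :
    FA (n + 1) st end_ t =
      if st > 37 then 0
      else if st = end_ then 1
      else (if t < 2 then FA n (st - 1) end_ (t + 1) else 0)
           + FA n (st + 5) end_ 0 + FA n (st * 2) end_ 0 := rfl

theorem fAList_succ (n : Nat) (st end_ : Int) (s : List Char) :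
    fAList (n + 1) st end_ s =
      if PySem.Chars.isIn ['A', 'A', 'A'] s || decide (st > 37) then 0
      else if st = end_ then 1
      else fAList n (st - 1) end_ (s ++ ['A']) + fAList n (st + 5) end_ (s ++ ['B'])
           + fAList n (st * 2) end_ (s ++ ['C']) := rfl

theorem trailA_cons (c : Char) (r : List Char) :
    trailA (c :: r) = if c = 'A' then trailA r + 1 else 0 := by
  by_cases h : c = 'A' <;> simp [trailA, h]

theorem prefixAA_iff (r : List Char) : ['A', 'A'] <+: r ↔ 2 ≤ trailA r := by
  match r with
  | [] => simp [trailA]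
  | [c] =>
    simp only [List.cons_prefix_cons, trailA]
    by_cases hc : c = 'A' <;> simp [hc, @eq_comm Char 'A']
  | a :: b :: r' =>
    simp only [List.cons_prefix_cons, trailA_cons]
    by_cases ha : a = 'A' <;> by_cases hb : b = 'A' <;> simp [ha, hb, @eq_comm Char 'A']

-- 'AAA' in s, read on the reversed list
def rhas (r : List Char) : Bool := PySem.Chars.isIn ['A', 'A', 'A'] r

theorem isIn_eq_rhas (s : List Char) :
    PySem.Chars.isIn ['A', 'A', 'A'] s = rhas s.reverse := by
  rw [Bool.eq_iff_iff, rhas, PySem.Chars.isIn_iff_infix, PySem.Chars.isIn_iff_infix]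
  constructor
  · intro h
    have := List.reverse_infix.mpr h
    simpa using this
  · intro h
    have := List.reverse_infix.mpr h
    simpa using this

theorem rhas_cons (c : Char) (r : List Char) :
    rhas (c :: r) = ((decide (c = 'A') && decide (2 ≤ trailA r)) || rhas r) := by
  rw [Bool.eq_iff_iff, rhas, rhas, PySem.Chars.isIn_iff_infix, List.infix_cons_iff,
    List.cons_prefix_cons, prefixAA_iff, ← PySem.Chars.isIn_iff_infix]
  simp [@eq_comm Char 'A']

-- A's recursion returns 0 as soon as the string contains 'AAA'
theorem fAList_of_has (n : Nat) (st end_ : Int) (s : List Char)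
    (h : PySem.Chars.isIn ['A', 'A', 'A'] s = true) : fAList n st end_ s = 0 := by
  cases n <;> simp [fAList, h]

-- L1: the port of A only depends on s through the trailing-'A' run
theorem fAList_eq_FA (n : Nat) (st end_ : Int) (s : List Char)
    (h : PySem.Chars.isIn ['A', 'A', 'A'] s = false) :
    fAList n st end_ s = FA n st end_ (trailA s.reverse) := by
  induction n generalizing st s with
  | zero => rfl
  | succ n ih =>
    rw [fAList_succ, FA_succ, h]
    simp only [Bool.false_or]
    by_cases h37 : st > 37
    · simp [h37]
    · simp only [h37, decide_false, if_false]
      by_cases he : st = end_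
      · simp [he]
      · simp only [if_neg he]
        have hA : PySem.Chars.isIn ['A', 'A', 'A'] (s ++ ['A'])
            = decide (2 ≤ trailA s.reverse) := by
          rw [isIn_eq_rhas, List.reverse_append]
          simp only [List.reverse_cons, List.reverse_nil, List.nil_append,
            List.singleton_append, rhas_cons]
          rw [isIn_eq_rhas] at h
          simp [h]
        have hB : PySem.Chars.isIn ['A', 'A', 'A'] (s ++ ['B']) = false := by
          rw [isIn_eq_rhas, List.reverse_append]
          simp only [List.reverse_cons, List.reverse_nil, List.nil_append,
            List.singleton_append, rhas_cons]
          rw [isIn_eq_rhas] at h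
          simp [h]
        have hC : PySem.Chars.isIn ['A', 'A', 'A'] (s ++ ['C']) = false := by
          rw [isIn_eq_rhas, List.reverse_append]
          simp only [List.reverse_cons, List.reverse_nil, List.nil_append,
            List.singleton_append, rhas_cons]
          rw [isIn_eq_rhas] at h
          simp [h]
        have trB : trailA (s ++ ['B']).reverse = 0 := by
          rw [List.reverse_append]; simp [trailA_cons]
        have trC : trailA (s ++ ['C']).reverse = 0 := by
          rw [List.reverse_append]; simp [trailA_cons]
        rw [ih _ _ hB, ih _ _ hC, trB, trC]
        by_cases ht : trailA s.reverse < 2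
        · have hA' : PySem.Chars.isIn ['A', 'A', 'A'] (s ++ ['A']) = false := by
            rw [hA]; simp; omega
          have trA : trailA (s ++ ['A']).reverse = trailA s.reverse + 1 := by
            rw [List.reverse_append]; simp [trailA_cons]
          rw [ih _ _ hA', trA, if_pos ht]
          simp
        · have hA' : PySem.Chars.isIn ['A', 'A', 'A'] (s ++ ['A']) = true := by
            rw [hA]; simp; omega
          rw [fAList_of_has _ _ _ _ hA', if_neg ht]
          simp

-- lookup into the grid built by one comprehension round
theorem bIdx_map (g : Int → Int → Int) (i t : Int) (h0 : 0 ≤ i) (h37 : i ≤ 37)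
    (t0 : 0 ≤ t) (t2 : t ≤ 2) :
    bIdx ((PySem.List.pyRange 0 38 1).map (fun i =>
      (PySem.List.pyRange 0 3 1).map (fun t => g i t))) i t = g i t := by
  have hr : PySem.List.pyRange 0 38 1
      = List.map (fun k : Nat => 0 + 1 * (k : Int)) (List.range 38) := by
    rw [PySem.List.pyRange_of_pos _ _ (by norm_num : (0:Int) < 1)]
    congr 1
  have hr3 : PySem.List.pyRange 0 3 1
      = List.map (fun k : Nat => 0 + 1 * (k : Int)) (List.range 3) := by
    rw [PySem.List.pyRange_of_pos _ _ (by norm_num : (0:Int) < 1)]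
    congr 1
  have hi : i = ((i.toNat : Nat) : Int) := by omega
  have ht : t = ((t.toNat : Nat) : Int) := by omega
  have hk : i.toNat < 38 := by omega
  have hu : t.toNat < 3 := by omega
  rw [bIdx, hi, PySem.List.pyGet?_natCast, hr]
  rw [List.getElem?_eq_getElem (by simpa using hk)]
  simp only [List.getElem_map, List.getElem_range, Option.getD_some]
  rw [ht, PySem.List.pyGet?_natCast, hr3]
  rw [List.getElem?_eq_getElem (by simpa using hu)]
  simp only [List.getElem_map, List.getElem_range, Option.getD_some]
  have e1 : 0 + 1 * ((i.toNat : Nat) : Int) = i := by omega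
  have e2 : 0 + 1 * ((t.toNat : Nat) : Int) = t := by omega
  rw [e1, e2, ← hi, ← ht]

theorem bIdx_v0 (i t : Int) (h0 : 0 ≤ i) (h37 : i ≤ 37) (t0 : 0 ≤ t) (t2 : t ≤ 2) :
    bIdx ((PySem.List.pyRange 0 38 1).map (fun _ => ([0, 0, 0] : List Int))) i t = 0 := by
  have hr : PySem.List.pyRange 0 38 1
      = List.map (fun k : Nat => 0 + 1 * (k : Int)) (List.range 38) := by
    rw [PySem.List.pyRange_of_pos _ _ (by norm_num : (0:Int) < 1)]
    congr 1
  have hi : i = ((i.toNat : Nat) : Int) := by omega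
  have hk : i.toNat < 38 := by omega
  rw [bIdx, hi, PySem.List.pyGet?_natCast, hr]
  rw [List.getElem?_eq_getElem (by simpa using hk)]
  simp only [List.getElem_map, Option.getD_some]
  interval_cases t <;> rfl

-- the ok set is closed under the three child moves (each child is terminal or again ok)
theorem okA (end_ i t : Int) (h : okState end_ i t) (ht : t < 2) :
    i - 1 > 37 ∨ i - 1 = end_ ∨ okState end_ (i - 1) (t + 1) := by
  unfold okState at *; omega

theorem okB (end_ i t : Int) (h : okState end_ i t) :
    i + 5 > 37 ∨ i + 5 = end_ ∨ okState end_ (i + 5) 0 := by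
  unfold okState at *; omega

theorem okC (end_ i t : Int) (h : okState end_ i t) :
    i * 2 > 37 ∨ i * 2 = end_ ∨ okState end_ (i * 2) 0 := by
  unfold okState at *; omega

theorem bGet_eq_FA (k : Nat) (end_ : Int) (v : List (List Int)) (j u : Int)
    (hinv : ∀ i t, okState end_ i t → bIdx v i t = FA (k + 1) i end_ t.toNat)
    (hj : j > 37 ∨ j = end_ ∨ okState end_ j u) :
    bGet end_ v j u = FA (k + 1) j end_ u.toNat := by
  rcases hj with hj | hj | hj
  · rw [bGet, if_pos hj, FA_succ, if_pos hj]
  · by_cases h37 : j > 37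
    · rw [bGet, if_pos h37, FA_succ, if_pos h37]
    · rw [bGet, if_neg h37, if_pos hj, FA_succ, if_neg h37, if_pos hj]
  · have hj' := hj
    obtain ⟨h1, h37, -, -, hne, -⟩ := hj'
    rw [bGet, if_neg (by omega), if_neg hne, if_pos (by omega : (0:Int) ≤ j)]
    exact hinv j u hj

theorem inv_step (k : Nat) (end_ : Int) (v : List (List Int))
    (hinv : ∀ i t, okState end_ i t → bIdx v i t = FA (k + 1) i end_ t.toNat) :
    ∀ i t, okState end_ i t → bIdx (bStep end_ v) i t = FA (k + 2) i end_ t.toNat := by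
  intro i t hok
  obtain ⟨h1, h37, ht0, ht2, hne, -⟩ := id hok
  rw [bStep, bIdx_map _ i t (by omega) h37 ht0 ht2]
  have hFA : FA (k + 1 + 1) i end_ t.toNat
      = (if t.toNat < 2 then FA (k + 1) (i - 1) end_ (t.toNat + 1) else 0)
        + FA (k + 1) (i + 5) end_ 0 + FA (k + 1) (i * 2) end_ 0 := by
    rw [FA_succ, if_neg (by omega : ¬ i > 37), if_neg hne]
  rw [hFA]
  congr 1
  · congr 1
    · -- the A-child term
      by_cases htlt : t < 2
      · rw [if_pos htlt, if_pos (show t.toNat < 2 by omega)]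
        have e : (t + 1).toNat = t.toNat + 1 := by omega
        rw [← e]
        exact bGet_eq_FA k end_ v _ _ hinv (okA end_ i t hok htlt)
      · rw [if_neg htlt, if_neg (show ¬ t.toNat < 2 by omega)]
    · -- the B-child term (i + 5)
      have h0 : (0 : Int).toNat = 0 := rfl
      rw [← h0]
      exact bGet_eq_FA k end_ v _ _ hinv (okB end_ i t hok)
  · -- the C-child term (2*i vs i*2)
    rw [show 2 * i = i * 2 from by ring]
    have h0 : (0 : Int).toNat = 0 := rfl
    rw [← h0]
    exact bGet_eq_FA k end_ v _ _ hinv (okC end_ i t hok)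

theorem inv_iterate (k : Nat) (end_ : Int) :
    ∀ i t, okState end_ i t →
      bIdx ((bStep end_)^[k] ((PySem.List.pyRange 0 38 1).map (fun _ => ([0, 0, 0] : List Int)))) i t
        = FA (k + 1) i end_ t.toNat := by
  induction k with
  | zero =>
    intro i t hok
    obtain ⟨h1, h37, ht0, ht2, hne, -⟩ := hok
    rw [Function.iterate_zero_apply, bIdx_v0 i t (by omega) h37 ht0 ht2]
    rw [FA_succ, if_neg (by omega), if_neg hne]
    simp [FA]
  | succ k ih =>
    intro i t hok
    rw [Function.iterate_succ_apply']
    exact inv_step k end_ _ ih i t hok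

theorem foldl_iterate {α β : Type} (g : α → α) (l : List β) (v : α) :
    l.foldl (fun v _ => g v) v = g^[l.length] v := by
  induction l generalizing v with
  | nil => rfl
  | cons a l ih => simp [List.foldl_cons, ih, Function.iterate_succ_apply]

theorem pyRange40_length : (PySem.List.pyRange 0 40 1).length = 40 := by decide

-- ===== VERDICT (by name: the statement is the Claim_ definition above) =====
theorem f_spec : Claim_equal_f := by
  intro st end_ s _ hpre
  unfold Spec_f f f_alt
  have hAAA : ("AAA".toList) = ['A', 'A', 'A'] := by decide
  by_cases hA : PySem.Str.isIn "AAA" s = true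
  · have hC : PySem.Chars.isIn ['A', 'A', 'A'] s.toList = true := by
      have h := hA; rw [PySem.Str.isIn_eq, hAAA] at h; exact h
    rw [fAList_of_has _ _ _ _ hC, hA]
    simp
  · have hAs : PySem.Str.isIn "AAA" s = false := by simpa using hA
    have hA' : PySem.Chars.isIn ['A', 'A', 'A'] s.toList = false := by
      have h := hAs; rw [PySem.Str.isIn_eq, hAAA] at h; exact h
    rw [hAs]
    by_cases h37 : st > 37
    · rw [fAList_succ, hA']
      simp [h37]
    · by_cases he : st = end_
      · rw [fAList_succ, hA']
        simp only [Bool.false_or]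
        rw [if_neg (by simpa using h37), if_pos he, if_neg (by simpa using h37), if_pos he]
      · -- main case: table lookup
        rw [fAList_eq_FA 41 st end_ s.toList hA']
        simp only [Bool.false_or]
        rw [if_neg (by simpa using h37), if_neg he]
        set tnat := trailA s.toList.reverse with htr
        have hok : okState end_ st (tnat : Int) := by
          rcases hpre with h | h | h | h
          · rw [PySem.Str.isIn_eq, hAAA] at h
            simp [h] at hA'
          · omega
          · omega
          · exact h
        have hst0 : ¬ st < 0 := by
          obtain ⟨hh, -⟩ := hok; omega
        rw [if_neg hst0]
        rw [foldl_iterate, pyRange40_length]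
        have hfin := inv_iterate 40 end_ st (tnat : Int) hok
        rw [hfin]
        norm_num
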